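-- pv_equiv track=rewrite | github.com/harshalDharpure/SAT_problem-solver | assign05.py | clause_length_counts
-- ===== SOURCE A (Python) =====
-- def clause_length_counts(clauses):
--     two=0; three=0; more=0
--     for cl in clauses:
--         l=len(cl)
--         if l==2: two+=1
--         elif l==3: three+=1
--         elif l>3: more+=1
--     return two,three,more
-- ===== SOURCE B (Python) =====
-- def clause_length_counts(clauses):
--     # Pass 1: histogram of clause lengths.
--     hist = {}
--     for cl in clauses:
--         l = len(cl)
--         hist[l] = hist.get(l, 0) + 1
--     # Pass 2: aggregate from the histogram (not from the clauses).
--     more = 0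
--     for k, v in hist.items():
--         if k > 3:
--             more += v
--     return hist.get(2, 0), hist.get(3, 0), more
-- ===== Notes on version B (the rewrite author's own statement) =====
-- stated objective: alternative
-- what changed: Replaces A's single loop with three mutable bucket counters by a histogram-then-aggregate strategy: one pass builds a dict mapping clause length to frequency, and a second pass over the histogram reads the 2- and 3-buckets and sums the entries with key > 3.
import Mathlib
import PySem

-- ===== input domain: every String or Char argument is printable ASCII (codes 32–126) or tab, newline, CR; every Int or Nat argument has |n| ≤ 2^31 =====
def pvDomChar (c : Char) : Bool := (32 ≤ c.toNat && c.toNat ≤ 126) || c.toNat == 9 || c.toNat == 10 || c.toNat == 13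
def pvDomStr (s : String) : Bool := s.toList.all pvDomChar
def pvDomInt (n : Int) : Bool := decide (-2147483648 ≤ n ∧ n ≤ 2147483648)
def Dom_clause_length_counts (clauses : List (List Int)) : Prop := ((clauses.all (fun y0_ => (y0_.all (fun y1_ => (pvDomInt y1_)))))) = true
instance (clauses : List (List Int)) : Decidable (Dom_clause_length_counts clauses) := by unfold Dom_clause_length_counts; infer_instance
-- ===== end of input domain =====

-- B replaces A's single loop with three mutable counters by a histogram of clause lengths
-- built once (a dict) and a second, histogram-shaped aggregation pass; same O(n) cost.

-- ===== PORT A =====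
def clauseStep (s : Int × Int × Int) (cl : List Int) : Int × Int × Int :=
  let l : Int := cl.length
  if l = 2 then (s.1 + 1, s.2.1, s.2.2)
  else if l = 3 then (s.1, s.2.1 + 1, s.2.2)
  else if l > 3 then (s.1, s.2.1, s.2.2 + 1)
  else s

def clause_length_counts (clauses : List (List Int)) : Int × Int × Int :=
  clauses.foldl clauseStep (0, 0, 0)

-- ===== PORT B =====
def clause_length_counts_alt (clauses : List (List Int)) : Int × Int × Int :=
  -- pass 1: histogram of clause lengths (hist[l] = hist.get(l, 0) + 1)
  let hist : PySem.Dict Int Int :=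
    clauses.foldl (fun d cl =>
      let l : Int := cl.length
      d.insert l (d.getD l 0 + 1)) PySem.Dict.empty
  -- pass 2: aggregate from the histogram items
  let more : Int := hist.items.foldl (fun m kv => if kv.1 > 3 then m + kv.2 else m) 0
  (hist.getD 2 0, hist.getD 3 0, more)

-- ===== PRECONDITION & SPEC =====
def Spec_clause_length_counts (clauses : List (List Int)) (out : Int × Int × Int) : Prop := out = clause_length_counts_alt clauses
instance (clauses : List (List Int)) (out : Int × Int × Int) : Decidable (Spec_clause_length_counts clauses out) := by unfold Spec_clause_length_counts; infer_instance

-- ===== CLAIM (what is proved, stated in full; the proofs are below) =====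
def Claim_equal_clause_length_counts : Prop := ∀ (clauses : List (List Int)), Dom_clause_length_counts clauses → Spec_clause_length_counts clauses (clause_length_counts clauses)

-- ===== LEMMAS AND PROOFS =====

-- A's fold computes the three countP's.
lemma foldl_counts (clauses : List (List Int)) (a b c : Int) :
    clauses.foldl clauseStep (a, b, c)
    = (a + (clauses.countP (fun cl => cl.length = 2) : Int),
       b + (clauses.countP (fun cl => cl.length = 3) : Int),
       c + (clauses.countP (fun cl => 3 < cl.length) : Int)) := by
  induction clauses generalizing a b c with
  | nil => simp
  | cons cl rest ih =>
    rw [List.foldl_cons, List.countP_cons, List.countP_cons, List.countP_cons]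
    by_cases h2 : (cl.length : Int) = 2
    · have e2 : cl.length = 2 := by exact_mod_cast h2
      have step : clauseStep (a, b, c) cl = (a + 1, b, c) := by simp [clauseStep, h2]
      rw [step, ih]
      simp [e2, Prod.ext_iff]
      omega
    · by_cases h3 : (cl.length : Int) = 3
      · have e3 : cl.length = 3 := by exact_mod_cast h3
        have step : clauseStep (a, b, c) cl = (a, b + 1, c) := by simp [clauseStep, h3]
        rw [step, ih]
        simp [e3, Prod.ext_iff]
        omega
      · by_cases hg : (cl.length : Int) > 3
        · have eg : 3 < cl.length := by exact_mod_cast hg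
          have step : clauseStep (a, b, c) cl = (a, b, c + 1) := by
            simp [clauseStep, h2, h3, hg]
          rw [step, ih]
          have n2 : ¬ cl.length = 2 := by omega
          have n3 : ¬ cl.length = 3 := by omega
          simp [eg, n2, n3, Prod.ext_iff]
          omega
        · have n2 : ¬ cl.length = 2 := fun h => h2 (by exact_mod_cast h)
          have n3 : ¬ cl.length = 3 := fun h => h3 (by exact_mod_cast h)
          have ng : ¬ 3 < cl.length := fun h => hg (by exact_mod_cast h)
          have step : clauseStep (a, b, c) cl = (a, b, c) := by
            simp [clauseStep, h2, h3, hg]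
          rw [step, ih]
          simp [n2, n3, ng]

-- B's histogram is Counter(lens).
lemma hist_eq_counter (clauses : List (List Int)) :
    clauses.foldl (fun d cl =>
        let l : Int := cl.length
        d.insert l (d.getD l 0 + 1)) PySem.Dict.empty
    = PySem.Dict.counter (clauses.map (fun cl => (cl.length : Int))) := by
  rw [← PySem.Dict.foldl_insert_getD_add_one_eq_counter, List.foldl_map]

-- the if-accumulating fold is the sum of the filtered values
lemma foldl_if_add (l : List (Int × Int)) (m : Int) :
    l.foldl (fun m kv => if kv.1 > 3 then m + kv.2 else m) m
    = m + ((l.filter (fun kv => kv.1 > 3)).map (·.2)).sum := by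
  induction l generalizing m with
  | nil => simp
  | cons kv rest ih =>
    by_cases h : kv.1 > 3
    · simp [h, ih]; ring
    · simp [h, ih]

-- summing the multiplicities of the distinct lengths > 3 counts the lengths > 3
lemma sum_counts_gt (lens : List Int) :
    (((PySem.Set.ofList lens).filter (fun k => k > 3)).map (fun k => (lens.count k : Int))).sum
    = (lens.countP (fun l => 3 < l) : Int) := by
  have hperm : (PySem.Set.ofList lens).Perm lens.dedup := by
    rw [List.perm_ext_iff_of_nodup (PySem.Set.nodup_ofList lens) lens.nodup_dedup]
    intro a
    rw [PySem.Set.mem_ofList, List.mem_dedup]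
  have hperm2 : (((PySem.Set.ofList lens).filter (fun k => k > 3)).map (fun k => (lens.count k : Int))).Perm
      (((lens.dedup.filter (fun k => k > 3)).map (fun k => (lens.count k : Int)))) :=
    (hperm.filter _).map _
  rw [hperm2.sum_eq]
  have h := List.sum_map_count_dedup_filter_eq_countP (fun k : Int => decide (k > 3)) lens
  rw [show ((lens.dedup.filter (fun k => k > 3)).map (fun k => (lens.count k : Int)))
        = ((lens.dedup.filter (fun k => decide (k > 3))).map (fun k => lens.count k)).map
            (fun n : Nat => (n : Int)) by
      rw [List.map_map]; rfl]
  rw [← Nat.cast_list_sum, h]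

-- counts over lens are countP's over clauses
lemma count_map_len (clauses : List (List Int)) (k : Nat) :
    (clauses.map (fun cl => (cl.length : Int))).count (k : Int)
    = clauses.countP (fun cl => cl.length = k) := by
  rw [List.count_eq_countP, List.countP_map]
  congr 1; funext cl
  rw [Bool.eq_iff_iff]
  simp only [Function.comp_def, beq_iff_eq, decide_eq_true_eq]
  omega

lemma countP_map_gt (clauses : List (List Int)) :
    (clauses.map (fun cl => (cl.length : Int))).countP (fun l => 3 < l)
    = clauses.countP (fun cl => 3 < cl.length) := by
  rw [List.countP_map]
  congr 1; funext cl
  rw [Bool.eq_iff_iff]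
  simp

lemma clause_length_counts_alt_eq (clauses : List (List Int)) :
    clause_length_counts_alt clauses
    = ((clauses.countP (fun cl => cl.length = 2) : Int),
       (clauses.countP (fun cl => cl.length = 3) : Int),
       (clauses.countP (fun cl => 3 < cl.length) : Int)) := by
  unfold clause_length_counts_alt
  rw [hist_eq_counter]
  set lens := clauses.map (fun cl => (cl.length : Int)) with hlens
  refine Prod.ext ?_ (Prod.ext ?_ ?_)
  · simp only [PySem.Dict.getD_counter]
    exact_mod_cast congrArg (Nat.cast (R := Int)) (count_map_len clauses 2)
  · simp only [PySem.Dict.getD_counter]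
    exact_mod_cast congrArg (Nat.cast (R := Int)) (count_map_len clauses 3)
  · simp only [PySem.Dict.items_counter]
    rw [foldl_if_add, zero_add, List.filter_map, List.map_map]
    have : ((PySem.Set.ofList lens).filter ((fun kv : Int × Int => decide (kv.1 > 3)) ∘ (fun k => (k, (lens.count k : Int))))).map
          ((fun kv : Int × Int => kv.2) ∘ (fun k => (k, (lens.count k : Int))))
        = ((PySem.Set.ofList lens).filter (fun k => k > 3)).map (fun k => (lens.count k : Int)) := by
      simp [Function.comp_def]
    rw [this, sum_counts_gt, countP_map_gt]

-- ===== VERDICT (by name: the statement is the Claim_ definition above) =====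
theorem clause_length_counts_spec : Claim_equal_clause_length_counts := by
  intro clauses _
  show clause_length_counts clauses = clause_length_counts_alt clauses
  rw [clause_length_counts_alt_eq]
  have := foldl_counts clauses 0 0 0
  simpa using this
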